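-- pv_equiv track=rewrite | github.com/akshay-greenlang/Code-V1_GreenLang | packs/ghg-accounting/PACK-041-scope-1-2-complete/integrations/pack_orchestrator.py | _can_parallelize
-- ===== SOURCE A (Python) =====
-- from enum import Enum
-- from typing import Any, Callable, Coroutine, Dict, List, Optional, Set
--
-- class PipelinePhase(str, Enum):
--     """The 12 phases of the Scope 1-2 Complete pipeline."""
--
--     BOUNDARY_SETUP = "boundary_setup"
--     DATA_INGESTION = "data_ingestion"
--     SCOPE1_STATIONARY = "scope1_stationary"
--     SCOPE1_REFRIGERANTS = "scope1_refrigerants"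
--     SCOPE1_MOBILE = "scope1_mobile"
--     SCOPE1_OTHER = "scope1_other"
--     SCOPE2_DUAL = "scope2_dual"
--     CONSOLIDATION = "consolidation"
--     UNCERTAINTY = "uncertainty"
--     TREND_ANALYSIS = "trend_analysis"
--     COMPLIANCE_MAPPING = "compliance_mapping"
--     REPORT_GENERATION = "report_generation"
--
-- PHASE_DEPENDENCIES: Dict[PipelinePhase, List[PipelinePhase]] = {
--     PipelinePhase.BOUNDARY_SETUP: [],
--     PipelinePhase.DATA_INGESTION: [PipelinePhase.BOUNDARY_SETUP],
--     PipelinePhase.SCOPE1_STATIONARY: [PipelinePhase.DATA_INGESTION],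
--     PipelinePhase.SCOPE1_REFRIGERANTS: [PipelinePhase.DATA_INGESTION],
--     PipelinePhase.SCOPE1_MOBILE: [PipelinePhase.DATA_INGESTION],
--     PipelinePhase.SCOPE1_OTHER: [PipelinePhase.DATA_INGESTION],
--     PipelinePhase.SCOPE2_DUAL: [PipelinePhase.DATA_INGESTION],
--     PipelinePhase.CONSOLIDATION: [
--         PipelinePhase.SCOPE1_STATIONARY,
--         PipelinePhase.SCOPE1_REFRIGERANTS,
--         PipelinePhase.SCOPE1_MOBILE,
--         PipelinePhase.SCOPE1_OTHER,
--         PipelinePhase.SCOPE2_DUAL,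
--     ],
--     PipelinePhase.UNCERTAINTY: [PipelinePhase.CONSOLIDATION],
--     PipelinePhase.TREND_ANALYSIS: [PipelinePhase.CONSOLIDATION],
--     PipelinePhase.COMPLIANCE_MAPPING: [
--         PipelinePhase.UNCERTAINTY,
--         PipelinePhase.TREND_ANALYSIS,
--     ],
--     PipelinePhase.REPORT_GENERATION: [PipelinePhase.COMPLIANCE_MAPPING],
-- }
--
-- def _can_parallelize(
--
--     phases: List[PipelinePhase],
-- ) -> List[List[PipelinePhase]]:
--     """Identify groups of phases that can execute in parallel.
--
--     Phases with the same set of dependencies can run concurrently.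
--
--     Args:
--         phases: All phases to analyze.
--
--     Returns:
--         List of parallel groups (each group is a list of phases).
--     """
--     dep_groups: Dict[str, List[PipelinePhase]] = {}
--     for phase in phases:
--         deps = PHASE_DEPENDENCIES.get(phase, [])
--         dep_key = ",".join(sorted(d.value for d in deps)) if deps else "__root__"
--         if dep_key not in dep_groups:
--             dep_groups[dep_key] = []
--         dep_groups[dep_key].append(phase)
--
--     return [group for group in dep_groups.values() if len(group) > 1]
-- ===== SOURCE B (Python) =====
-- from enum import Enum
-- from typing import Dict, List
--
-- class PipelinePhase(str, Enum):
--     BOUNDARY_SETUP = "boundary_setup"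
--     DATA_INGESTION = "data_ingestion"
--     SCOPE1_STATIONARY = "scope1_stationary"
--     SCOPE1_REFRIGERANTS = "scope1_refrigerants"
--     SCOPE1_MOBILE = "scope1_mobile"
--     SCOPE1_OTHER = "scope1_other"
--     SCOPE2_DUAL = "scope2_dual"
--     CONSOLIDATION = "consolidation"
--     UNCERTAINTY = "uncertainty"
--     TREND_ANALYSIS = "trend_analysis"
--     COMPLIANCE_MAPPING = "compliance_mapping"
--     REPORT_GENERATION = "report_generation"
--
-- PHASE_DEPENDENCIES: Dict[PipelinePhase, List[PipelinePhase]] = {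
--     PipelinePhase.BOUNDARY_SETUP: [],
--     PipelinePhase.DATA_INGESTION: [PipelinePhase.BOUNDARY_SETUP],
--     PipelinePhase.SCOPE1_STATIONARY: [PipelinePhase.DATA_INGESTION],
--     PipelinePhase.SCOPE1_REFRIGERANTS: [PipelinePhase.DATA_INGESTION],
--     PipelinePhase.SCOPE1_MOBILE: [PipelinePhase.DATA_INGESTION],
--     PipelinePhase.SCOPE1_OTHER: [PipelinePhase.DATA_INGESTION],
--     PipelinePhase.SCOPE2_DUAL: [PipelinePhase.DATA_INGESTION],
--     PipelinePhase.CONSOLIDATION: [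
--         PipelinePhase.SCOPE1_STATIONARY,
--         PipelinePhase.SCOPE1_REFRIGERANTS,
--         PipelinePhase.SCOPE1_MOBILE,
--         PipelinePhase.SCOPE1_OTHER,
--         PipelinePhase.SCOPE2_DUAL,
--     ],
--     PipelinePhase.UNCERTAINTY: [PipelinePhase.CONSOLIDATION],
--     PipelinePhase.TREND_ANALYSIS: [PipelinePhase.CONSOLIDATION],
--     PipelinePhase.COMPLIANCE_MAPPING: [
--         PipelinePhase.UNCERTAINTY,
--         PipelinePhase.TREND_ANALYSIS,
--     ],
--     PipelinePhase.REPORT_GENERATION: [PipelinePhase.COMPLIANCE_MAPPING],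
-- }
--
--
-- def _dep_key(phase) -> str:
--     deps = PHASE_DEPENDENCIES.get(phase, [])
--     return ",".join(sorted(d.value for d in deps)) if deps else "__root__"
--
--
-- def _can_parallelize(phases):
--     """Greedy scan: repeatedly take the first remaining phase, sweep its
--     dependency-key equals into one group, keep groups of size > 1."""
--     result = []
--     remaining = list(phases)
--     while remaining:
--         key = _dep_key(remaining[0])
--         group = [p for p in remaining if _dep_key(p) == key]
--         if len(group) > 1:
--             result.append(group)
--         remaining = [p for p in remaining[1:] if _dep_key(p) != key]
--     return result
-- ===== Notes on version B (the rewrite author's own statement) =====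
-- stated objective: alternative
-- what changed: B drops A's dict-of-groups index entirely and instead greedily scans the remaining phases: take the first phase, sweep every phase with the same dependency key into one group, recurse on the rest, keeping groups of size > 1.
import Mathlib
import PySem

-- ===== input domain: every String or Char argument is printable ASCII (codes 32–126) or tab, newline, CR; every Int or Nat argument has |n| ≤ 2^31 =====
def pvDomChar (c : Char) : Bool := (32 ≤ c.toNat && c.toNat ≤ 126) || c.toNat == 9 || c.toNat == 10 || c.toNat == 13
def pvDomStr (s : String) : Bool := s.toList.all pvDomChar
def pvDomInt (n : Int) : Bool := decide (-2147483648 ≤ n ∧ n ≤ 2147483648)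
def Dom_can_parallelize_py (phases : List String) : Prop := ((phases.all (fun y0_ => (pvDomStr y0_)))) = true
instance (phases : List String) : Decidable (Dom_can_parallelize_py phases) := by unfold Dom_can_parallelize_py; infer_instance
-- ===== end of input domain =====

-- B replaces A's dict-of-groups index by a greedy scan over the remaining phases
-- (take the first phase, sweep out every phase with the same dependency key, recurse);
-- objective: alternative decomposition, same results.


-- ===== PORT A =====
-- PHASE_DEPENDENCIES with PipelinePhase members represented by their .value strings
def PHASE_DEPENDENCIES : PySem.Dict String (List String) := PySem.Dict.ofList [
  ("boundary_setup", []),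
  ("data_ingestion", ["boundary_setup"]),
  ("scope1_stationary", ["data_ingestion"]),
  ("scope1_refrigerants", ["data_ingestion"]),
  ("scope1_mobile", ["data_ingestion"]),
  ("scope1_other", ["data_ingestion"]),
  ("scope2_dual", ["data_ingestion"]),
  ("consolidation", ["scope1_stationary", "scope1_refrigerants", "scope1_mobile", "scope1_other", "scope2_dual"]),
  ("uncertainty", ["consolidation"]),
  ("trend_analysis", ["consolidation"]),
  ("compliance_mapping", ["uncertainty", "trend_analysis"]),
  ("report_generation", ["compliance_mapping"])]

def can_parallelize_py (phases : List String) : List (List String) :=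
  let dep_groups : PySem.Dict String (List String) := phases.foldl (fun d phase =>
    let deps := PHASE_DEPENDENCIES.getD phase []
    let dep_key := if !deps.isEmpty then PySem.Str.join "," (PySem.List.sorted deps (fun x => x)) else "__root__"
    let d := if !d.contains dep_key then d.insert dep_key [] else d
    d.modify dep_key [] (fun g => g ++ [phase])) PySem.Dict.empty
  dep_groups.values.filter (fun g => decide (1 < g.length))

-- ===== PORT B =====
def depKey (phase : String) : String :=
  let deps := PHASE_DEPENDENCIES.getD phase []
  if !deps.isEmpty then PySem.Str.join "," (PySem.List.sorted deps (fun x => x)) else "__root__"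

def parGroups (remaining : List String) : List (List String) :=
  match remaining with
  | [] => []
  | h :: t =>
    let key := depKey h
    let group := h :: t.filter (fun p => depKey p == key)
    let rest := t.filter (fun p => depKey p != key)
    if 1 < group.length then group :: parGroups rest else parGroups rest
termination_by remaining.length
decreasing_by all_goals
  (simp only [List.length_cons, List.length_unattach];
   exact Nat.lt_succ_of_le (le_trans (List.length_filter_le _ _) (by simp)))

def can_parallelize_py_alt (phases : List String) : List (List String) := parGroups phases

-- ===== PRECONDITION & SPEC =====
def Spec_can_parallelize_py (phases : List String) (out : List (List String)) : Prop := out = can_parallelize_py_alt phases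
instance (phases : List String) (out : List (List String)) : Decidable (Spec_can_parallelize_py phases out) := by unfold Spec_can_parallelize_py; infer_instance

-- ===== CLAIM (what is proved, stated in full; the proofs are below) =====
def Claim_equal_can_parallelize_py : Prop := ∀ (phases : List String), Dom_can_parallelize_py phases → Spec_can_parallelize_py phases (can_parallelize_py phases)

-- ===== LEMMAS AND PROOFS =====

-- the common normal form both programs are reduced to
def specGroups (phases : List String) : List (List String) :=
  ((PySem.Set.ofList (phases.map depKey)).map
    (fun k => phases.filter (fun p => depKey p == k))).filter (fun g => decide (1 < g.length))

-- A's loop body: setdefault-then-append equals a single modify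
theorem insert_modify_absent (d : PySem.Dict String (List String)) (k : String) (f : List String → List String)
    (h : d.contains k = false) :
    (d.insert k []).modify k [] f = d.modify k [] f := by
  have ha : (d.items.any fun p => p.1 == k) = false := by simpa [PySem.Dict.contains] using h
  have hne : ∀ p ∈ d.items, (p.1 == k) = false := by
    intro p hp; exact Bool.eq_false_iff.mpr (List.any_eq_false.mp ha p hp)
  have hcont2 : (PySem.Dict.mk (d.items ++ [(k, ([] : List String))])).contains k = true := by
    simp [PySem.Dict.contains]
  have hfind : List.find? (fun p => p.1 == k) d.items = none :=
    List.find?_eq_none.mpr (fun p hp => by simp [hne p hp])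
  have hget : PySem.Dict.getD (PySem.Dict.mk (d.items ++ [(k, ([] : List String))])) k [] = [] := by
    simp only [PySem.Dict.getD, PySem.Dict.get?, List.find?_append, hfind]
    simp
  have hgetd : PySem.Dict.getD d k [] = [] := PySem.Dict.getD_of_not_contains d [] h
  apply PySem.Dict.ext
  simp only [PySem.Dict.modify, PySem.Dict.insert, h, if_false, Bool.false_eq_true, hcont2, if_true, hget]
  rw [hgetd, List.map_append]
  rw [List.map_congr_left (g := id) (fun p hp => by simp [hne p hp])]
  simp

theorem A_eq_spec (phases : List String) : can_parallelize_py phases = specGroups phases := by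
  have hstep : (fun (d : PySem.Dict String (List String)) (phase : String) =>
      let deps := PHASE_DEPENDENCIES.getD phase []
      let dep_key := if !deps.isEmpty then PySem.Str.join "," (PySem.List.sorted deps (fun x => x)) else "__root__"
      let d := if !d.contains dep_key then d.insert dep_key [] else d
      d.modify dep_key [] (fun g => g ++ [phase]))
      = (fun d phase => d.modify (depKey phase) [] (fun g => g ++ [phase])) := by
    funext d p
    show (if !d.contains (depKey p) then d.insert (depKey p) [] else d).modify (depKey p) [] (fun g => g ++ [p])
        = d.modify (depKey p) [] (fun g => g ++ [p])
    by_cases hc : d.contains (depKey p) = true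
    · simp [hc]
    · simp only [Bool.not_eq_true] at hc
      simp [hc, insert_modify_absent d (depKey p) _ hc]
  unfold can_parallelize_py
  simp only [hstep]
  set D := phases.foldl (fun d phase => d.modify (depKey phase) [] (fun g => g ++ [phase])) PySem.Dict.empty with hD
  have hkeys : D.keys = PySem.Set.ofList (phases.map depKey) := by
    rw [hD, PySem.Dict.keys_foldl_modify_key phases depKey [] (fun _ p => (fun g => g ++ [p]))]
    simp [PySem.Dict.keys_empty, PySem.Set.update_nil_left]
  have hnodup : D.keys.Nodup := by
    rw [hD]
    exact PySem.Dict.nodup_keys_foldl_modify_key phases depKey [] _ _ (by simp [PySem.Dict.keys_empty])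
  have hgetD : ∀ c, D.getD c [] = phases.filter (fun p => depKey p == c) := by
    intro c
    rw [hD]
    have : phases.foldl (fun d phase => d.modify (depKey phase) [] (fun g => g ++ [phase])) PySem.Dict.empty
        = (phases.map (fun p => (depKey p, p))).foldl (fun d pr => d.modify pr.1 [] (fun x => x ++ [pr.2])) PySem.Dict.empty := by
      rw [List.foldl_map]
    rw [this, PySem.Dict.getD_foldl_modify_append]
    simp [List.filter_map, Function.comp_def, List.map_map]
  have hvals := PySem.Dict.values_eq_map_keys D hnodup []
  rw [hvals, hkeys]
  unfold specGroups
  congr 1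
  exact List.map_congr_left (fun k _ => hgetD k)

theorem discard_comm (s : PySem.Set String) (a b : String) :
    (s.discard a).discard b = (s.discard b).discard a := by
  simp only [PySem.Set.discard, List.filter_filter]
  exact List.filter_congr (fun x _ => by rw [Bool.and_comm])

theorem discard_idem (s : PySem.Set String) (a : String) :
    (s.discard a).discard a = s.discard a := by
  simp only [PySem.Set.discard, List.filter_filter]
  exact List.filter_congr (fun x _ => by rw [Bool.and_self])

theorem ofList_filter_ne (l : List String) (k : String) :
    PySem.Set.ofList (l.filter (fun x => x != k)) = (PySem.Set.ofList l).discard k := by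
  induction l with
  | nil => simp [PySem.Set.discard]
  | cons x t ih =>
    by_cases hx : x = k
    · subst hx
      rw [List.filter_cons_of_neg (by simp), ih, PySem.Set.ofList_cons]
      show _ = List.filter _ _
      rw [List.filter_cons_of_neg (by simp), ← PySem.Set.discard, discard_idem]
    · rw [List.filter_cons_of_pos (by simp [hx]), PySem.Set.ofList_cons, ih,
        PySem.Set.ofList_cons]
      show _ = List.filter _ _
      rw [List.filter_cons_of_pos (by simp [hx]), ← PySem.Set.discard, discard_comm]

theorem spec_cons (h : String) (t : List String) :
    specGroups (h :: t) =
      (if 1 < (h :: t.filter (fun p => depKey p == depKey h)).length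
       then (h :: t.filter (fun p => depKey p == depKey h)) :: specGroups (t.filter (fun p => depKey p != depKey h))
       else specGroups (t.filter (fun p => depKey p != depKey h))) := by
  have hrestmap : (t.filter (fun p => depKey p != depKey h)).map depKey
      = (t.map depKey).filter (fun x => x != depKey h) := by
    rw [List.filter_map]; rfl
  have hdisc : (PySem.Set.ofList (t.map depKey)).discard (depKey h)
      = PySem.Set.ofList ((t.filter (fun p => depKey p != depKey h)).map depKey) := by
    rw [hrestmap, ofList_filter_ne]
  have hmapcongr : ∀ k' ∈ (PySem.Set.ofList (t.map depKey)).discard (depKey h),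
      (h :: t).filter (fun p => depKey p == k')
        = (t.filter (fun p => depKey p != depKey h)).filter (fun p => depKey p == k') := by
    intro k' hk'
    have hne : k' ≠ depKey h := ((PySem.Set.mem_discard _ _ _).mp hk').2
    rw [List.filter_cons_of_neg (by simp; exact fun e => (hne e.symm).elim)]
    rw [List.filter_filter]
    refine (List.filter_congr (fun x _ => ?_)).symm
    by_cases hx : depKey x = k'
    · simp [hx, hne]
    · simp [hx]
  have hmap2 : List.map (fun k' => (h :: t).filter (fun p => depKey p == k'))
        ((PySem.Set.ofList (t.map depKey)).discard (depKey h))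
      = List.map (fun k' => (t.filter (fun p => depKey p != depKey h)).filter (fun p => depKey p == k'))
        ((PySem.Set.ofList (t.map depKey)).discard (depKey h)) := List.map_congr_left hmapcongr
  have hhead : (h :: t).filter (fun p => depKey p == depKey h)
      = h :: t.filter (fun p => depKey p == depKey h) := List.filter_cons_of_pos (by simp)
  unfold specGroups
  rw [List.map_cons, PySem.Set.ofList_cons, List.map_cons, hhead, hmap2, hdisc, List.filter_cons]
  simp only [decide_eq_true_eq]

theorem parGroups_eq_spec (remaining : List String) : parGroups remaining = specGroups remaining := by
  induction remaining using parGroups.induct with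
  | case1 => simp [parGroups, specGroups]
  | case2 h t key group rest hlen ih =>
    have hrest : rest = List.filter (fun p => depKey p != depKey h) t := by
      simp only [rest, List.unattach_filter, List.unattach_attach]
      rfl
    rw [hrest] at ih
    rw [parGroups, spec_cons]
    split_ifs
    · exact congrArg (List.cons _) ih
    · exact ih
  | case3 h t key group rest hlen ih =>
    have hrest : rest = List.filter (fun p => depKey p != depKey h) t := by
      simp only [rest, List.unattach_filter, List.unattach_attach]
      rfl
    rw [hrest] at ih
    rw [parGroups, spec_cons]
    split_ifs
    · exact congrArg (List.cons _) ih
    · exact ih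

theorem B_eq_spec (phases : List String) : can_parallelize_py_alt phases = specGroups phases :=
  parGroups_eq_spec phases

-- ===== VERDICT (by name: the statement is the Claim_ definition above) =====
theorem can_parallelize_py_spec : Claim_equal_can_parallelize_py := by
  intro phases _
  unfold Spec_can_parallelize_py
  rw [A_eq_spec, B_eq_spec]
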